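-- pv_equiv track=rewrite | github.com/YeoJiSu/Programming | 7단계/10.py | count
-- ===== SOURCE A (Python) =====
-- def count(str1):
--     alpha=[]
--     for j in str1:
--         if j not in alpha:
--             alpha.append(j)
--         else:
--             if (j!=alpha[-1]):
--                 return False
--     return True
-- ===== SOURCE B (Python) =====
-- def count(str1):
--     # Collapse str1 into its run-length key sequence, then check all keys are distinct.
--     keys = []
--     for c in str1:
--         if not keys or keys[-1] != c:
--             keys.append(c)
--     return len(keys) == len(set(keys))
-- ===== Notes on version B (the rewrite author's own statement) =====
-- stated objective: idiomatic
-- what changed: B first collapses the string into its run-length key sequence and then checks those keys for distinctness, instead of A's incremental seen-list with a compare-each-repeat-to-the-last-distinct-char check.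
import Mathlib
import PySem

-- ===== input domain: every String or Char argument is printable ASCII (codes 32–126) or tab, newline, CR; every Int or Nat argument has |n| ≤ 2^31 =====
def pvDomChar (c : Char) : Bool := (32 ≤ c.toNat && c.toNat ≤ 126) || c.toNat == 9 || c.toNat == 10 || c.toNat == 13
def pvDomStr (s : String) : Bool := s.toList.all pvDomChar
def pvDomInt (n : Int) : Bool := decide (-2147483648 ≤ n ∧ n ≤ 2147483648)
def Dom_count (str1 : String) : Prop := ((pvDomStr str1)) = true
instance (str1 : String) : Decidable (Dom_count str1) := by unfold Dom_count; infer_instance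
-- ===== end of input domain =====

-- B collapses the string into its run-length key sequence and checks the keys are distinct;
-- A incrementally keeps a seen-list and compares each repeated char to the last distinct char.

-- ===== PORT A =====
-- loop 'for j in str1' with state alpha; 'return False' modelled by the false branch.
-- alpha[-1] → pyGet? alpha (-1); the none case is unreachable in Python (the branch runs only
-- when j ∈ alpha, so alpha ≠ []); comparing against 'some j' is exact there.
def pvCountLoopA : List Char → List Char → Bool
  | [], _alpha => true
  | j :: rest, alpha =>
    if j ∉ alpha then pvCountLoopA rest (alpha ++ [j])
    else if PySem.List.pyGet? alpha (-1) ≠ some j then false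
    else pvCountLoopA rest alpha

def count (str1 : String) : Bool := pvCountLoopA str1.toList []

-- ===== PORT B =====
-- loop 'for c in str1' building keys; keys[-1] → pyGet? keys (-1)
def pvKeysLoop : List Char → List Char → List Char
  | [], keys => keys
  | c :: rest, keys =>
    if keys = [] ∨ PySem.List.pyGet? keys (-1) ≠ some c then pvKeysLoop rest (keys ++ [c])
    else pvKeysLoop rest keys

def count_alt (str1 : String) : Bool :=
  let keys := pvKeysLoop str1.toList []
  keys.length == (PySem.Set.ofList keys).length

-- ===== PRECONDITION & SPEC =====
def Spec_count (str1 : String) (out : Bool) : Prop := out = count_alt str1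
instance (str1 : String) (out : Bool) : Decidable (Spec_count str1 out) := by unfold Spec_count; infer_instance

-- ===== CLAIM (what is proved, stated in full; the proofs are below) =====
def Claim_equal_count : Prop := ∀ (str1 : String), Dom_count str1 → Spec_count str1 (count str1)

-- ===== LEMMAS AND PROOFS =====

-- keys only ever grows at the back
theorem pvKeysLoop_sublist (t : List Char) : ∀ keys : List Char, keys.Sublist (pvKeysLoop t keys) := by
  induction t with
  | nil => intro keys; simp [pvKeysLoop]
  | cons c rest ih =>
    intro keys
    simp only [pvKeysLoop]
    split
    · exact List.Sublist.trans (List.sublist_append_left keys [c]) (ih (keys ++ [c]))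
    · exact ih keys

-- main invariant: for a duplicate-free seen-list, A's loop answers whether the collapsed keys stay duplicate-free
theorem pvLoop_eq (t : List Char) :
    ∀ alpha : List Char, alpha.Nodup →
      pvCountLoopA t alpha = decide (pvKeysLoop t alpha).Nodup := by
  induction t with
  | nil => intro alpha h; simp [pvCountLoopA, pvKeysLoop, h]
  | cons j rest ih =>
    intro alpha h
    simp only [pvCountLoopA, pvKeysLoop, PySem.List.pyGet?_neg_one]
    by_cases hmem : j ∈ alpha
    · have hne : alpha ≠ [] := by rintro rfl; simp at hmem
      by_cases hlast : alpha.getLast? = some j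
      · -- repeat of the last distinct char: both loops keep their state
        simp [hmem, hlast, hne, ih alpha h]
      · -- repeat of an earlier char: A returns False, B's keys pick up a duplicate
        have hcond : alpha = [] ∨ alpha.getLast? ≠ some j := Or.inr hlast
        have hdup : ¬ (alpha ++ [j]).Nodup := by
          intro hnd
          exact (List.nodup_append.mp hnd).2.2 j hmem j (by simp) rfl
        have hres : ¬ (pvKeysLoop rest (alpha ++ [j])).Nodup := fun hnd =>
          hdup (hnd.sublist (pvKeysLoop_sublist rest (alpha ++ [j])))
        simp [hmem, hlast, hne, hres]
    · -- new char: both append it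
      have hcond : alpha = [] ∨ alpha.getLast? ≠ some j := by
        rcases List.eq_nil_or_concat alpha with rfl | ⟨pre, x, rfl⟩
        · exact Or.inl rfl
        · right
          simp only [List.concat_eq_append, List.getLast?_concat]
          intro hx
          obtain rfl : x = j := by injection hx
          exact hmem (by simp)
      have hnd : (alpha ++ [j]).Nodup :=
        List.Nodup.append h (List.nodup_singleton j)
          (by intro a ha hj; simp at hj; exact hmem (hj ▸ ha))
      simp [hmem, hcond, ih (alpha ++ [j]) hnd]

-- |set(keys)| = |keys| exactly when keys has no duplicates
theorem pvOfList_length_eq_iff (keys : List Char) :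
    ((PySem.Set.ofList keys).length = keys.length) ↔ keys.Nodup := by
  have hperm : (PySem.Set.ofList keys).Perm keys.dedup := by
    refine (List.perm_ext_iff_of_nodup (PySem.Set.nodup_ofList keys) keys.nodup_dedup).mpr ?_
    intro a; simp [PySem.Set.mem_ofList, List.mem_dedup]
  rw [hperm.length_eq]
  constructor
  · intro hlen
    have hsub : keys.dedup.Sublist keys := List.dedup_sublist keys
    have : keys.dedup = keys := hsub.eq_of_length hlen
    rw [← this]; exact keys.nodup_dedup
  · intro hnd; rw [List.Nodup.dedup hnd]

-- ===== VERDICT (by name: the statement is the Claim_ definition above) =====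
theorem count_spec : Claim_equal_count := by
  intro str1 _
  unfold Spec_count count count_alt
  rw [pvLoop_eq str1.toList [] List.nodup_nil]
  rcases Decidable.em ((pvKeysLoop str1.toList []).Nodup) with hnd | hnd
  · simp [hnd, (pvOfList_length_eq_iff _).mpr hnd]
  · have hne' : (pvKeysLoop str1.toList []).length ≠ (PySem.Set.ofList (pvKeysLoop str1.toList [])).length :=
      fun hl => hnd ((pvOfList_length_eq_iff _).mp hl.symm)
    simp [hnd, hne']
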